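-- pv_equiv track=rewrite | github.com/Magialeaf/Course | Crypto/DES解密函数版.py | ByteToBit
-- ===== SOURCE A (Python) =====
-- def ByteToBit(Data_in:str)->list:# void ByteToBit(bool* Data_out, char* Data_in, int Num);
--     Data_out = []   #初始化Data_out
--     for s in Data_in:   #每次从Data_in获得一个字符
--         temp = []
--         for i in bin(ord(s) + 256):     #把字符转化成ASCII码
--             if i != 'b':
--                 temp.append(int(i))
--         temp = temp[-8:]#re
--         temp = temp[::-1]
--         Data_out = Data_out + temp    #把转化后的结果加入都Data_out列表中去
--     return Data_out
-- ===== SOURCE B (Python) =====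
-- def ByteToBit(Data_in: str) -> list:
--     Data_out = []
--     for s in Data_in:
--         n = ord(s)
--         for i in range(8):
--             Data_out.append((n >> i) & 1)
--     return Data_out
-- ===== Notes on version B (the rewrite author's own statement) =====
-- stated objective: faster
-- what changed: B extracts each character's low 8 bits LSB-first by shift-and-mask appends, replacing A's bin()-string formatting, per-character digit parsing, last-8 slice, reversal and quadratic list re-concatenation (Data_out = Data_out + temp).
import Mathlib
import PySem

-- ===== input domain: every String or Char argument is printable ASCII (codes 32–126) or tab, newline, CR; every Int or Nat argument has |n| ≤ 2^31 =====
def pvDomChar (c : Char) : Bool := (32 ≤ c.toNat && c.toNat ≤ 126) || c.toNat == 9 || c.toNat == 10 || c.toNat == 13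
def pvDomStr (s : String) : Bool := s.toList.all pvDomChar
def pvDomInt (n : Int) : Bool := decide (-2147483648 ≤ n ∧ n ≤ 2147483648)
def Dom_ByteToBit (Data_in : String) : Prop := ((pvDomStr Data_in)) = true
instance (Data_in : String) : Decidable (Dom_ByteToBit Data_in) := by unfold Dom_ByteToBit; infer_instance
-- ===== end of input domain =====

-- B replaces A's bin()-string formatting, digit parsing, slicing and reversal by shift-and-mask bit extraction (idiomatic; return value only).

-- ===== PORT A =====
-- Python bin(n) for n ≥ 0, as a char list ("0b…" with binary digits MSB-first);
-- exact for the nonnegative arguments A uses (Nat.toDigits 2 is the base-2 digit string)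
def pvBin (n : Nat) : List Char :=
  '0' :: 'b' :: Nat.toDigits 2 n

def ByteToBit (Data_in : String) : List Int :=
  Data_in.toList.foldl (fun Data_out s =>
    let temp : List Int :=
      (pvBin (s.toNat + 256)).foldl
        (fun t i => if i ≠ 'b' then t ++ [((i.toNat : Int) - 48)] else t) []
        -- int(i): i is a digit char here, so its value is its code minus 48 (exact)
    let temp := PySem.List.slice temp (some (-8)) none     -- temp[-8:]
    let temp := temp.reverse                               -- temp[::-1]
    Data_out ++ temp) []

-- ===== PORT B =====
def ByteToBit_alt (Data_in : String) : List Int :=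
  Data_in.toList.foldl (fun Data_out s =>
    let n := s.toNat
    (List.range 8).foldl (fun out i => out ++ [(((n >>> i) &&& 1 : Nat) : Int)]) Data_out) []

-- ===== PRECONDITION & SPEC =====
def Spec_ByteToBit (Data_in : String) (out : List Int) : Prop := out = ByteToBit_alt Data_in
instance (Data_in : String) (out : List Int) : Decidable (Spec_ByteToBit Data_in out) := by unfold Spec_ByteToBit; infer_instance

-- ===== CLAIM (what is proved, stated in full; the proofs are below) =====
def Claim_equal_ByteToBit : Prop := ∀ (Data_in : String), Dom_ByteToBit Data_in → Spec_ByteToBit Data_in (ByteToBit Data_in)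

-- ===== LEMMAS AND PROOFS =====

-- A's per-character value, as a function of the character code
def pvATemp (n : Nat) : List Int :=
  (PySem.List.slice
    ((pvBin (n + 256)).foldl
      (fun t i => if i ≠ 'b' then t ++ [((i.toNat : Int) - 48)] else t) [])
    (some (-8)) none).reverse

-- B's per-character value
def pvBTemp (n : Nat) : List Int :=
  (List.range 8).map (fun i => (((n >>> i) &&& 1 : Nat) : Int))

set_option maxRecDepth 4096 in
theorem pvTemp_eq_of_lt (n : Nat) (h : n < 256) : pvATemp n = pvBTemp n := by
  have H : ∀ m : Fin 256, pvATemp m.val = pvBTemp m.val := by decide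
  exact H ⟨n, h⟩

theorem pvFold_eq (cs : List Char) (acc : List Int) (h : cs.all pvDomChar = true) :
    cs.foldl (fun Data_out s =>
      let temp : List Int :=
        (pvBin (s.toNat + 256)).foldl
          (fun t i => if i ≠ 'b' then t ++ [((i.toNat : Int) - 48)] else t) []
      let temp := PySem.List.slice temp (some (-8)) none
      let temp := temp.reverse
      Data_out ++ temp) acc
    = cs.foldl (fun Data_out s =>
      let n := s.toNat
      (List.range 8).foldl (fun out i => out ++ [(((n >>> i) &&& 1 : Nat) : Int)]) Data_out) acc := by
  induction cs generalizing acc with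
  | nil => rfl
  | cons c cs ih =>
    simp only [List.all_cons, Bool.and_eq_true] at h
    have hc : c.toNat < 256 := by
      simp only [pvDomChar, Bool.or_eq_true, Bool.and_eq_true, beq_iff_eq,
        decide_eq_true_eq] at h
      omega
    simp only [List.foldl_cons]
    rw [ih _ h.2]
    congr 1
    have := pvTemp_eq_of_lt c.toNat hc
    simp only [pvATemp, pvBTemp] at this
    rw [PySem.List.foldl_append_singleton_eq_map, this]

-- ===== VERDICT (by name: the statement is the Claim_ definition above) =====
theorem ByteToBit_spec : Claim_equal_ByteToBit := by
  intro s hdom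
  unfold Spec_ByteToBit ByteToBit ByteToBit_alt
  exact pvFold_eq s.toList [] hdom
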